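-- pv_equiv track=rewrite | github.com/TrestenPool/Advent_of_Code | Day2/main.py | get_our_play
-- ===== SOURCE A (Python) =====
-- outcomes = [
--   # Won
--   [ ('scissors', 'rock'), ('rock', 'paper'), ('paper', 'scissors') ],
--   # Loss
--   [ ('rock', 'scissors'), ('paper', 'rock'), ('scissors', 'paper') ],
--   # Draw
--   [('rock', 'rock'), ('paper', 'paper'), ('scissors', 'scissors') ]
-- ]
--
-- def get_our_play(other_elf, our_elf):
--   if our_elf == 'X':  # We need to lose
--     index = 1
--   elif our_elf == 'Y':# we need to draw
--     index = 2
--   elif our_elf == 'Z':# We need to win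
--     index = 0
--
--   array_to_check = outcomes[index]
--   for x,y in array_to_check:
--     if x == other_elf:
--       return y
-- ===== SOURCE B (Python) =====
-- def get_our_play(other_elf, our_elf):
--     names = ('rock', 'paper', 'scissors')
--     offset = {'X': 2, 'Y': 0, 'Z': 1}[our_elf]
--     if other_elf not in names:
--         return None
--     return names[(names.index(other_elf) + offset) % 3]
-- ===== Notes on version B (the rewrite author's own statement) =====
-- stated objective: idiomatic
-- what changed: Replaces the hard-coded outcome table and linear scan with integer codes 0/1/2 and a closed-form (code + offset) % 3 lookup.
import Mathlib
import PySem

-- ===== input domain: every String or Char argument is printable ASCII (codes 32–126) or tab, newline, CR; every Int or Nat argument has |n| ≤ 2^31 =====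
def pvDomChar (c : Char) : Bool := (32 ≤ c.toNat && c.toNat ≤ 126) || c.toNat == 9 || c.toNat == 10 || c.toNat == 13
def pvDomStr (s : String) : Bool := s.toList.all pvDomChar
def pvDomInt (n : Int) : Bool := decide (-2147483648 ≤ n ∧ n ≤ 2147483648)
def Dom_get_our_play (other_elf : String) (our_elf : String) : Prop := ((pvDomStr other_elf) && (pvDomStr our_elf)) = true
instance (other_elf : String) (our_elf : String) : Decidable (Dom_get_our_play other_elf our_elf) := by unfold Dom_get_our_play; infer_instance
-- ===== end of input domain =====

-- B replaces A's outcome table and linear scan by integer codes and (code + offset) % 3; return-value equivalence on Pre_ (our_elf ∈ {X,Y,Z}; elsewhere both Pythons raise).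

-- ===== PORT A =====
def pvOutcomes : List (List (String × String)) :=
  [ [("scissors", "rock"), ("rock", "paper"), ("paper", "scissors")],
    [("rock", "scissors"), ("paper", "rock"), ("scissors", "paper")],
    [("rock", "rock"), ("paper", "paper"), ("scissors", "scissors")] ]

-- the for-loop: first pair whose x equals other_elf, returning y; falls through to None
def pvScan (other_elf : String) : List (String × String) → Option String
  | [] => none
  | (x, y) :: rest => if x = other_elf then some y else pvScan other_elf rest

def get_our_play (other_elf : String) (our_elf : String) : Option String :=
  -- index is unbound (UnboundLocalError, excluded by Pre_) when our_elf ∉ {X,Y,Z}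
  let index? : Option Nat :=
    if our_elf = "X" then some 1
    else if our_elf = "Y" then some 2
    else if our_elf = "Z" then some 0
    else none
  match index? with
  | none => none
  | some index =>
    match PySem.List.pyGet? pvOutcomes (index : Int) with
    | none => none
    | some array_to_check => pvScan other_elf array_to_check

-- ===== PORT B =====
def get_our_play_alt (other_elf : String) (our_elf : String) : Option String :=
  let names : List String := ["rock", "paper", "scissors"]
  let offsets : PySem.Dict String Int := PySem.Dict.ofList [("X", 2), ("Y", 0), ("Z", 1)]
  match PySem.Dict.get? offsets our_elf with  -- KeyError when absent, excluded by Pre_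
  | none => none
  | some offset =>
    if ¬ names.contains other_elf then none
    else
      match PySem.List.index? names other_elf with
      | none => none
      | some i => PySem.List.pyGet? names (PySem.Int.mod (i + offset) 3)

-- ===== PRECONDITION & SPEC =====
-- Pre_ excludes exactly the inputs on which A raises UnboundLocalError (our_elf not a strategy letter); B raises KeyError there.
def Pre_get_our_play (other_elf : String) (our_elf : String) : Prop :=
  our_elf = "X" ∨ our_elf = "Y" ∨ our_elf = "Z"
instance (other_elf : String) (our_elf : String) : Decidable (Pre_get_our_play other_elf our_elf) := by unfold Pre_get_our_play; infer_instance

def pvWitness_get_our_play : String × String := ("rock", "X")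

def Spec_get_our_play (other_elf : String) (our_elf : String) (out : Option String) : Prop := out = get_our_play_alt other_elf our_elf
instance (other_elf : String) (our_elf : String) (out : Option String) : Decidable (Spec_get_our_play other_elf our_elf out) := by unfold Spec_get_our_play; infer_instance

-- ===== CLAIM (what is proved, stated in full; the proofs are below) =====
def Claim_equal_get_our_play : Prop := ∀ (other_elf : String) (our_elf : String), Dom_get_our_play other_elf our_elf → Pre_get_our_play other_elf our_elf → Spec_get_our_play other_elf our_elf (get_our_play other_elf our_elf)

-- ===== LEMMAS AND PROOFS =====

-- with our_elf fixed to a strategy letter, both sides agree for every other_elf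
lemma pv_agree (other_elf our_elf : String)
    (h : our_elf = "X" ∨ our_elf = "Y" ∨ our_elf = "Z") :
    get_our_play other_elf our_elf = get_our_play_alt other_elf our_elf := by
  by_cases h1 : other_elf = "rock"
  · rcases h with h | h | h <;> subst h <;> subst h1 <;> decide
  · by_cases h2 : other_elf = "paper"
    · rcases h with h | h | h <;> subst h <;> subst h2 <;> decide
    · by_cases h3 : other_elf = "scissors"
      · rcases h with h | h | h <;> subst h <;> subst h3 <;> decide
      · rcases h with h | h | h <;> subst h <;>
          simp [get_our_play, get_our_play_alt, pvOutcomes, pvScan,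
                PySem.List.pyGet?, PySem.List.pyIdx?, PySem.Dict.get?,
                PySem.Dict.ofList, PySem.Dict.empty, PySem.Dict.update, PySem.Dict.insert,
                h1, h2, h3, Ne.symm h1, Ne.symm h2, Ne.symm h3]

-- ===== VERDICT (by name: the statement is the Claim_ definition above) =====
theorem get_our_play_spec : Claim_equal_get_our_play := by
  intro other_elf our_elf _ hpre
  unfold Spec_get_our_play
  exact pv_agree other_elf our_elf hpre
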